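-- pv_equiv track=rewrite | github.com/CL2001/Personal-Projects | FileExplorerPong.py | trajectoire5g
-- ===== SOURCE A (Python) =====
-- def trajectoire1g(current_pos, trajectoire):
--     while current_pos not in (0, 15, 30, 45, 60, 75, 90, 105, 120, 135):
--         current_pos -= 16
--         trajectoire.append(current_pos)
--         if 0 <= current_pos <= 14:
--             current_pos, nouv_trajectoire = trajectoire5g(current_pos, trajectoire)
--             trajectoire + nouv_trajectoire
--     return current_pos, trajectoire
--
-- def trajectoire5g(current_pos, trajectoire):
--     while current_pos not in (0, 15, 30, 45, 60, 75, 90, 105, 120, 135):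
--         current_pos += 14
--         trajectoire.append(current_pos)
--         if 135 <= current_pos <= 149:
--             current_pos, nouv_trajectoire = trajectoire1g(current_pos, trajectoire)
--             trajectoire + nouv_trajectoire
--     return current_pos, trajectoire
-- ===== SOURCE B (Python) =====
-- def trajectoire5g(current_pos, trajectoire):
--     step = 14
--     while current_pos not in (0, 15, 30, 45, 60, 75, 90, 105, 120, 135):
--         current_pos += step
--         trajectoire.append(current_pos)
--         if step == 14 and 135 <= current_pos <= 149:
--             step = -16
--         elif step == -16 and 0 <= current_pos <= 14:
--             step = 14
--     return current_pos, trajectoire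
-- ===== Notes on version B (the rewrite author's own statement) =====
-- stated objective: simpler
-- what changed: Replaced the mutual recursion between trajectoire5g and trajectoire1g with one self-contained iterative loop that keeps the current bounce direction (+14 or -16) in a variable and flips it at the bands [135,149] and [0,14].
import Mathlib
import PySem

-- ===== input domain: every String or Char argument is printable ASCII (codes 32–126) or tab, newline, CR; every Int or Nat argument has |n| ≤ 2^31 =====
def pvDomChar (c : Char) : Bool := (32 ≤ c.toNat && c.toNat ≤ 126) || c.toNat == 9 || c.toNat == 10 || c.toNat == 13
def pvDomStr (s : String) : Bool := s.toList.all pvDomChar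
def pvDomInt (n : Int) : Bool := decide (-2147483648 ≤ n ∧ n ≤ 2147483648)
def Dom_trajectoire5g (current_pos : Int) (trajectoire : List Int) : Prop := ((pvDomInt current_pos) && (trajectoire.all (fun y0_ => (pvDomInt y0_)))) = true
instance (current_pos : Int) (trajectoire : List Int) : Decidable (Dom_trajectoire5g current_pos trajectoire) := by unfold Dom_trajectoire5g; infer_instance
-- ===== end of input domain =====

-- B replaces the mutual recursion of A (trajectoire5g/trajectoire1g) by one iterative loop
-- keeping the bounce direction in a variable (objective: simpler).  Equivalence is about the
-- RETURN value; the Python versions additionally mutate `trajectoire` in place identically.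

-- ===== PORT A =====
-- the tuple of goal positions Python tests membership in
def pyS : List Int := [0, 15, 30, 45, 60, 75, 90, 105, 120, 135]

-- The two Python while-loops become fuel-indexed structural recursion (fuel only makes the
-- mutually recursive loops total; it is provably sufficient on every input satisfying Pre_).
mutual
def traj1gAux : Nat → Int → List Int → Int × List Int
  | 0, p, t => (p, t)
  | Nat.succ f, p, t =>
    if p ∈ pyS then (p, t)
    else
      let p1 := p - 16
      let t1 := t ++ [p1]
      if 0 ≤ p1 ∧ p1 ≤ 14 then
        let r := traj5gAux f p1 t1
        traj1gAux f r.1 r.2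
      else traj1gAux f p1 t1
def traj5gAux : Nat → Int → List Int → Int × List Int
  | 0, p, t => (p, t)
  | Nat.succ f, p, t =>
    if p ∈ pyS then (p, t)
    else
      let p1 := p + 14
      let t1 := t ++ [p1]
      if 135 ≤ p1 ∧ p1 ≤ 149 then
        let r := traj1gAux f p1 t1
        traj5gAux f r.1 r.2
      else traj5gAux f p1 t1
end

-- fuel sufficient for every terminating input (current_pos ≤ 135): the climb towards the
-- bands needs at most (-current_pos).toNat steps, the bouncing phase at most 14 more.
def pvFuel (p : Int) : Nat := 16 + (-p).toNat

def trajectoire5g (current_pos : Int) (trajectoire : List Int) : Int × List Int :=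
  traj5gAux (2 * pvFuel current_pos) current_pos trajectoire

-- ===== PORT B =====
def altAux : Nat → Int → Int → List Int → Int × List Int
  | 0, _, p, t => (p, t)
  | Nat.succ f, step, p, t =>
    if p ∈ pyS then (p, t)
    else
      let p1 := p + step
      let t1 := t ++ [p1]
      let step1 := if step = 14 ∧ 135 ≤ p1 ∧ p1 ≤ 149 then (-16 : Int)
                   else if step = -16 ∧ 0 ≤ p1 ∧ p1 ≤ 14 then 14 else step
      altAux f step1 p1 t1

def trajectoire5g_alt (current_pos : Int) (trajectoire : List Int) : Int × List Int :=
  altAux (pvFuel current_pos) 14 current_pos trajectoire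

-- ===== PRECONDITION & SPEC =====
-- Pre_ excludes exactly current_pos ≥ 136, where the Python A never returns (its while loop
-- keeps adding 14 above the bounce band and diverges).
def Pre_trajectoire5g (current_pos : Int) (trajectoire : List Int) : Prop :=
  current_pos ≤ 135
instance (current_pos : Int) (trajectoire : List Int) : Decidable (Pre_trajectoire5g current_pos trajectoire) := by unfold Pre_trajectoire5g; infer_instance

def pvWitness_trajectoire5g : Int × List Int := (7, [3])

def Spec_trajectoire5g (current_pos : Int) (trajectoire : List Int) (out : Int × List Int) : Prop := out = trajectoire5g_alt current_pos trajectoire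
instance (current_pos : Int) (trajectoire : List Int) (out : Int × List Int) : Decidable (Spec_trajectoire5g current_pos trajectoire out) := by unfold Spec_trajectoire5g; infer_instance

-- ===== CLAIM (what is proved, stated in full; the proofs are below) =====
def Claim_equal_trajectoire5g : Prop := ∀ (current_pos : Int) (trajectoire : List Int), Dom_trajectoire5g current_pos trajectoire → Pre_trajectoire5g current_pos trajectoire → Spec_trajectoire5g current_pos trajectoire (trajectoire5g current_pos trajectoire)

-- ===== LEMMAS AND PROOFS =====

-- one-step unfolding equations (definitional)
theorem altAux_succ_eq (f : Nat) (s p : Int) (t : List Int) :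
    altAux (f + 1) s p t = if p ∈ pyS then (p, t) else
      altAux f (if s = 14 ∧ 135 ≤ p + s ∧ p + s ≤ 149 then (-16 : Int)
                else if s = -16 ∧ 0 ≤ p + s ∧ p + s ≤ 14 then 14 else s)
        (p + s) (t ++ [p + s]) := rfl

theorem traj5gAux_succ_eq (f : Nat) (p : Int) (t : List Int) :
    traj5gAux (f + 1) p t = if p ∈ pyS then (p, t) else
      if 135 ≤ p + 14 ∧ p + 14 ≤ 149 then
        traj5gAux f (traj1gAux f (p + 14) (t ++ [p + 14])).1 (traj1gAux f (p + 14) (t ++ [p + 14])).2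
      else traj5gAux f (p + 14) (t ++ [p + 14]) := rfl

theorem traj1gAux_succ_eq (f : Nat) (p : Int) (t : List Int) :
    traj1gAux (f + 1) p t = if p ∈ pyS then (p, t) else
      if 0 ≤ p - 16 ∧ p - 16 ≤ 14 then
        traj1gAux f (traj5gAux f (p - 16) (t ++ [p - 16])).1 (traj5gAux f (p - 16) (t ++ [p - 16])).2
      else traj1gAux f (p - 16) (t ++ [p - 16]) := rfl

-- the first component of a B-run does not depend on the accumulated list
theorem altAux_fst_indep (f : Nat) (s p : Int) (t t' : List Int) :
    (altAux f s p t).1 = (altAux f s p t').1 := by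
  induction f generalizing s p t t' with
  | zero => rfl
  | succ f ih =>
    rw [altAux_succ_eq, altAux_succ_eq]
    split
    · rfl
    · exact ih _ _ _ _

-- once a B-run ends in the goal set, extra fuel does not change the result
theorem altAux_mono (f g : Nat) (s p : Int) (t : List Int) (hfg : f ≤ g)
    (h : (altAux f s p t).1 ∈ pyS) : altAux g s p t = altAux f s p t := by
  induction f generalizing g s p t with
  | zero =>
    cases g with
    | zero => rfl
    | succ g =>
      simp only [altAux] at h
      rw [altAux_succ_eq, if_pos h]
      rfl
  | succ f ih =>
    cases g with
    | zero => omega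
    | succ g =>
      rw [altAux_succ_eq] at h
      rw [altAux_succ_eq g, altAux_succ_eq f]
      by_cases hs : p ∈ pyS
      · rw [if_pos hs, if_pos hs]
      · rw [if_neg hs] at h
        rw [if_neg hs, if_neg hs]
        exact ih g _ _ _ (by omega) h

-- in the bouncing region 0 ≤ p ≤ 135 the flat loop reaches the goal set within 16 steps
theorem altAux_region_all :
    ((List.range 136).all fun k => decide ((altAux 16 14 ((k : Nat) : Int) []).1 ∈ pyS)) = true := by
  decide

theorem altAux_region (p : Int) (h0 : 0 ≤ p) (h1 : p ≤ 135) (t : List Int) :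
    (altAux 16 14 p t).1 ∈ pyS := by
  have hmem : p.toNat ∈ List.range 136 := by
    simp only [List.mem_range]; omega
  have hdec := of_decide_eq_true (List.all_eq_true.mp altAux_region_all p.toNat hmem)
  rw [altAux_fst_indep 16 14 p t []]
  rwa [Int.toNat_of_nonneg h0] at hdec

-- climb phase: from any current_pos ≤ 135, B terminates in the goal set with fuel 16 + n
theorem altAux_terminates (n : Nat) (p : Int) (t : List Int)
    (hp : p ≤ 135) (hn : -(14 * (n : Int)) ≤ p) :
    (altAux (16 + n) 14 p t).1 ∈ pyS := by
  induction n generalizing p t with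
  | zero => exact altAux_region p (by omega) hp t
  | succ n ih =>
    by_cases h0 : 0 ≤ p
    · have hreg := altAux_region p h0 hp t
      rw [altAux_mono 16 (16 + (n + 1)) 14 p t (by omega) hreg]
      exact hreg
    · replace h0 : p < 0 := lt_of_not_ge h0
      have hns : p ∉ pyS := by
        intro hmem
        fin_cases hmem <;> omega
      have hfe : 16 + (n + 1) = (16 + n) + 1 := by omega
      rw [hfe, altAux_succ_eq, if_neg hns]
      have hband : ¬ ((14 : Int) = 14 ∧ 135 ≤ p + 14 ∧ p + 14 ≤ 149) := by
        intro hx; obtain ⟨-, h2, h3⟩ := hx; omega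
      have hband2 : ¬ ((14 : Int) = -16 ∧ 0 ≤ p + 14 ∧ p + 14 ≤ 14) := by
        intro hx; exact absurd hx.1 (by decide)
      rw [if_neg hband, if_neg hband2]
      refine ih (p + 14) (t ++ [p + 14]) (by omega) ?_
      have : -(14 * ((n : Int) + 1)) ≤ p := by push_cast at hn; omega
      omega

-- simulation: a terminating flat run with direction 14 equals A's 5g loop, with direction
-- -16 A's 1g loop, given at least twice the fuel on the A side
theorem sim (f : Nat) :
    (∀ p t g, 2 * f ≤ g → (altAux f 14 p t).1 ∈ pyS → traj5gAux g p t = altAux f 14 p t) ∧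
    (∀ p t g, 2 * f ≤ g → (altAux f (-16) p t).1 ∈ pyS → traj1gAux g p t = altAux f (-16) p t) := by
  induction f with
  | zero =>
    constructor <;>
    · intro p t g _ h
      simp only [altAux] at h
      cases g with
      | zero => rfl
      | succ g =>
        first
        | (rw [traj5gAux_succ_eq, if_pos h]; rfl)
        | (rw [traj1gAux_succ_eq, if_pos h]; rfl)
  | succ f ih =>
    obtain ⟨ih5, ih1⟩ := ih
    constructor
    · intro p t g hg h
      cases g with
      | zero => omega
      | succ g =>
        rw [altAux_succ_eq] at h
        rw [altAux_succ_eq, traj5gAux_succ_eq]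
        by_cases hs : p ∈ pyS
        · rw [if_pos hs, if_pos hs]
        · rw [if_neg hs] at h
          rw [if_neg hs, if_neg hs]
          by_cases hb : (135 : Int) ≤ p + 14 ∧ p + 14 ≤ 149
          · have hc : ((14 : Int) = 14 ∧ 135 ≤ p + 14 ∧ p + 14 ≤ 149) := ⟨rfl, hb⟩
            rw [if_pos hc] at h ⊢
            rw [if_pos hb]
            have h1 := ih1 (p + 14) (t ++ [p + 14]) g (by omega) h
            rw [h1]
            cases g with
            | zero => omega
            | succ g => rw [traj5gAux_succ_eq, if_pos h, Prod.mk.eta]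
          · have hc : ¬ ((14 : Int) = 14 ∧ 135 ≤ p + 14 ∧ p + 14 ≤ 149) := fun hx => hb hx.2
            have hc2 : ¬ ((14 : Int) = -16 ∧ 0 ≤ p + 14 ∧ p + 14 ≤ 14) := fun hx =>
              absurd hx.1 (by decide)
            rw [if_neg hc, if_neg hc2] at h ⊢
            rw [if_neg hb]
            exact ih5 (p + 14) (t ++ [p + 14]) g (by omega) h
    · intro p t g hg h
      cases g with
      | zero => omega
      | succ g =>
        rw [altAux_succ_eq] at h
        rw [altAux_succ_eq, traj1gAux_succ_eq]
        by_cases hs : p ∈ pyS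
        · rw [if_pos hs, if_pos hs]
        · rw [if_neg hs] at h
          rw [if_neg hs, if_neg hs]
          have hps : p + (-16) = p - 16 := by ring
          by_cases hb : (0 : Int) ≤ p - 16 ∧ p - 16 ≤ 14
          · have hc1 : ¬ ((-16 : Int) = 14 ∧ 135 ≤ p + (-16) ∧ p + (-16) ≤ 149) := fun hx =>
              absurd hx.1 (by decide)
            have hc2 : ((-16 : Int) = -16 ∧ 0 ≤ p + (-16) ∧ p + (-16) ≤ 14) := ⟨rfl, by omega⟩
            rw [if_neg hc1, if_pos hc2] at h
            rw [hps] at h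
            rw [if_neg hc1, if_pos hc2, hps, if_pos hb]
            have h5 := ih5 (p - 16) (t ++ [p - 16]) g (by omega) h
            rw [h5]
            cases g with
            | zero => omega
            | succ g => rw [traj1gAux_succ_eq, if_pos h, Prod.mk.eta]
          · have hc1 : ¬ ((-16 : Int) = 14 ∧ 135 ≤ p + (-16) ∧ p + (-16) ≤ 149) := fun hx =>
              absurd hx.1 (by decide)
            have hc2 : ¬ ((-16 : Int) = -16 ∧ 0 ≤ p + (-16) ∧ p + (-16) ≤ 14) := fun hx => by
              exact hb (by omega)
            rw [if_neg hc1, if_neg hc2] at h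
            rw [hps] at h
            rw [if_neg hc1, if_neg hc2, hps, if_neg hb]
            exact ih1 (p - 16) (t ++ [p - 16]) g (by omega) h

-- ===== VERDICT (by name: the statement is the Claim_ definition above) =====
theorem trajectoire5g_spec : Claim_equal_trajectoire5g := by
  intro p t _ hpre
  unfold Spec_trajectoire5g trajectoire5g trajectoire5g_alt
  have hterm : (altAux (pvFuel p) 14 p t).1 ∈ pyS := by
    have : pvFuel p = 16 + (-p).toNat := rfl
    rw [this]
    exact altAux_terminates (-p).toNat p t hpre (by omega)
  exact (sim (pvFuel p)).1 p t (2 * pvFuel p) (by omega) hterm
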